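-- pv_equiv track=rewrite | github.com/h1s97x/Cryptogrphy | StreamCipher/ZUC.py | bit_array_to_string
-- ===== SOURCE A (Python) =====
-- def bit_array_to_string(array, length):
--     res = ''
--     for i in range(len(array)):
--         if (i + 1) % length == 0:
--             res += str(array[i]) + ' '
--         else:
--             res += str(array[i])
--     res = res
--     return res
-- ===== SOURCE B (Python) =====
-- def bit_array_to_string(array, length):
--     pieces = []
--     for i in range(0, len(array), length):
--         chunk = ''.join(str(x) for x in array[i:i + length])
--         pieces.append(chunk + ' ' if i + length <= len(array) else chunk)
--     return ''.join(pieces)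
-- ===== Notes on version B (the rewrite author's own statement) =====
-- stated objective: alternative
-- what changed: A walks index-by-index testing (i+1)%length and grows the result by repeated string concatenation; B iterates chunk starts in steps of length, builds each block with ''.join over a slice, appends the space exactly to full blocks, and joins the pieces once. Pre_ restricts to positive chunk lengths: length==0 makes A raise ZeroDivisionError, and for negative length A's spacing every |length| digits is an accident of Python's signed modulo while B's range with a negative step is naturally empty.
-- outside the precondition, e.g. on bit_array_to_string([1, 0, 1, 1], -2): A returns '10 11 ', B returns ''; on bit_array_to_string([], 0): A returns '', B raises ValueError
import Mathlib
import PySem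

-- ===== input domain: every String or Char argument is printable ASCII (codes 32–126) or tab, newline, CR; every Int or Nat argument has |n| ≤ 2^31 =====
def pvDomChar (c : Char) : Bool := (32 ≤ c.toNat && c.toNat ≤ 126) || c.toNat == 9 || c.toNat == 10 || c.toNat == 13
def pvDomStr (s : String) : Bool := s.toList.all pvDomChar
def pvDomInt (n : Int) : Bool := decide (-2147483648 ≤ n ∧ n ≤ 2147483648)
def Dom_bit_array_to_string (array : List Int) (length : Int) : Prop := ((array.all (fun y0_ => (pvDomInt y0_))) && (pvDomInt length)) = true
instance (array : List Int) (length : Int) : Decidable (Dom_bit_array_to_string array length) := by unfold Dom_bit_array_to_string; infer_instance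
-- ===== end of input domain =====

-- B replaces A's per-index modulus test by a chunk decomposition: iterate block starts in steps of
-- length, join each block's digits, and append the space exactly to the full blocks (alternative
-- decomposition, same cost). Pre_ restricts to positive chunk lengths: length = 0 makes A raise
-- ZeroDivisionError on non-empty arrays, and for negative length A's spacing every |length| digits
-- is an accident of Python's signed modulo while B's range with a negative step is naturally empty.


-- ===== PORT A =====
def bit_array_to_string (array : List Int) (length : Int) : String :=
  (PySem.List.pyRange 0 (array.length : Int) 1).foldl
    (fun res i =>
      if PySem.Int.mod (i + 1) length = 0 then
        res ++ PySem.Int.toStr (PySem.List.pyGetD array i 0) ++ " "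
      else
        res ++ PySem.Int.toStr (PySem.List.pyGetD array i 0)) ""

-- ===== PORT B =====
def bit_array_to_string_alt (array : List Int) (length : Int) : String :=
  let pieces : List String :=
    (PySem.List.pyRange 0 (array.length : Int) length).foldl
      (fun ps i =>
        let chunk := PySem.Str.join ""
          ((PySem.List.slice array (some i) (some (i + length))).map PySem.Int.toStr)
        if i + length ≤ (array.length : Int) then ps ++ [chunk ++ " "] else ps ++ [chunk]) []
  PySem.Str.join "" pieces

-- ===== PRECONDITION & SPEC =====
-- Pre_ restricts to positive chunk lengths (the function's natural domain): for length = 0 A raises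
-- ZeroDivisionError on every non-empty array, and for negative length A's spacing every |length|
-- digits is an accident of Python's signed modulo (B's range with a negative step is empty there).
def Pre_bit_array_to_string (array : List Int) (length : Int) : Prop := 0 < length
instance (array : List Int) (length : Int) : Decidable (Pre_bit_array_to_string array length) := by unfold Pre_bit_array_to_string; infer_instance
def pvWitness_bit_array_to_string : List Int × Int := ([1, 0, 1, 1], 2)

def Spec_bit_array_to_string (array : List Int) (length : Int) (out : String) : Prop := out = bit_array_to_string_alt array length
instance (array : List Int) (length : Int) (out : String) : Decidable (Spec_bit_array_to_string array length out) := by unfold Spec_bit_array_to_string; infer_instance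

-- ===== CLAIM (what is proved, stated in full; the proofs are below) =====
def Claim_equal_bit_array_to_string : Prop := ∀ (array : List Int) (length : Int), Dom_bit_array_to_string array length → Pre_bit_array_to_string array length → Spec_bit_array_to_string array length (bit_array_to_string array length)

-- ===== LEMMAS AND PROOFS =====

def pvChunks (t : Nat) (xs : List Int) : List Char :=
  if xs.isEmpty then []
  else
    (xs.take (t + 1)).flatMap (fun x => PySem.Int.toChars x) ++
      (if t + 1 ≤ xs.length then ' ' :: pvChunks t (xs.drop (t + 1)) else [])
termination_by xs.length
decreasing_by
  simp_all [List.isEmpty_iff]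
  cases xs <;> simp_all

theorem pvRange00 (s : Int) : PySem.List.pyRange 0 0 s = [] := by
  unfold PySem.List.pyRange
  split_ifs <;> simp_all

theorem pvChunkCons (b s : Int) (hs : 0 < s) (hb : 0 < b) :
    PySem.List.pyRange 0 b s = 0 :: (PySem.List.pyRange 0 (b - s) s).map (· + s) := by
  rw [PySem.List.pyRange_of_pos 0 b hs, PySem.List.pyRange_of_pos 0 (b - s) hs]
  have hdiv : (b - 0 + s - 1) / s = (b - 1) / s + 1 := by
    have : b - 0 + s - 1 = (b - 1) + 1 * s := by ring
    rw [this, Int.add_mul_ediv_right _ _ hs.ne']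
  have hnn : 0 ≤ (b - 1) / s := Int.ediv_nonneg (by omega) hs.le
  by_cases hsb : 0 < b - s
  · have h2 : (b - s - 0 + s - 1) / s = (b - 1) / s := by ring_nf
    rw [if_pos hb, if_pos hsb, hdiv, h2]
    have : ((b - 1) / s + 1).toNat = ((b - 1) / s).toNat + 1 := by omega
    rw [this, List.range_succ_eq_map]
    simp only [List.map_cons, List.map_map]
    congr 1
    · simp
    · apply List.map_congr_left
      intro k _
      simp [Function.comp, Nat.succ_eq_add_one]
      ring
  · have hz : (b - 1) / s = 0 := Int.ediv_eq_zero_of_lt (by omega) (by omega)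
    rw [if_pos hb, if_neg hsb, hdiv, hz]
    simp

theorem pvMapTake (xs : List Int) (m : Nat) (d : Int) (h : m ≤ xs.length) :
    (PySem.List.pyRange 0 (m : Int) 1).map (fun j => PySem.List.pyGetD xs j d) = xs.take m := by
  rw [PySem.List.pyRange_one]
  simp only [Int.sub_zero, Int.toNat_natCast, List.map_map]
  apply List.ext_getElem
  · simp [Nat.min_eq_left h]
  · intro i h1 h2
    simp only [List.getElem_map, List.getElem_range, Function.comp, List.getElem_take]
    have hi : i < m := by simpa using h1
    rw [show ((0 : Int) + (i : Int)) = ((i : Nat) : Int) by omega,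
      PySem.List.pyGetD_eq_getElem xs d (by omega) (by exact_mod_cast Nat.lt_of_lt_of_le hi h)]
    simp

theorem pvRangeShift (s n : Nat) (h : s ≤ n) :
    PySem.List.pyRange (s : Int) (n : Int) 1 = (PySem.List.pyRange 0 ((n - s : Nat) : Int) 1).map (· + (s : Int)) := by
  rw [PySem.List.pyRange_one, PySem.List.pyRange_one]
  simp only [Int.sub_zero, Int.toNat_natCast, List.map_map]
  have : ((n : Int) - (s : Int)).toNat = n - s := by omega
  rw [this]
  apply List.map_congr_left
  intro k _
  simp [Function.comp]; omega

theorem pvFoldStr (l : List Int) (g : Int → String) (init : String) :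
    (l.foldl (fun r i => r ++ g i) init).toList = init.toList ++ l.flatMap (fun i => (g i).toList) := by
  induction l generalizing init with
  | nil => simp
  | cons x xs ih => simp [List.foldl_cons, ih, String.toList_append]

theorem pvJoinNil (l : List (List Char)) : PySem.Chars.join [] l = l.flatten := by
  induction l with
  | nil => rfl
  | cons x xs ih =>
    cases xs with
    | nil => simp [PySem.Chars.join, List.intercalate]
    | cons y t =>
      simp only [PySem.Chars.join, List.intercalate, List.intersperse] at *
      simp_all

theorem pvSpaceToList : (" " : String).toList = [' '] := by decide

theorem pvA_toList (xs : List Int) (L : Int) :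
    (bit_array_to_string xs L).toList =
      (PySem.List.pyRange 0 (xs.length : Int) 1).flatMap
        (fun i => PySem.Int.toChars (PySem.List.pyGetD xs i 0) ++
          (if PySem.Int.mod (i + 1) L = 0 then [' '] else [])) := by
  unfold bit_array_to_string
  have hb : (fun (res : String) (i : Int) =>
      if PySem.Int.mod (i + 1) L = 0 then
        res ++ PySem.Int.toStr (PySem.List.pyGetD xs i 0) ++ " "
      else
        res ++ PySem.Int.toStr (PySem.List.pyGetD xs i 0)) =
      (fun res i => res ++ (if PySem.Int.mod (i + 1) L = 0
        then PySem.Int.toStr (PySem.List.pyGetD xs i 0) ++ " "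
        else PySem.Int.toStr (PySem.List.pyGetD xs i 0))) := by
    funext r i; split_ifs <;> simp [String.append_assoc]
  rw [hb, pvFoldStr]
  simp only [String.toList_empty, List.nil_append]
  apply List.flatMap_congr
  intro i _
  split_ifs <;> simp [String.toList_append, PySem.Int.toList_toStr, pvSpaceToList]

theorem pvB_toList (xs : List Int) (L : Int) :
    (bit_array_to_string_alt xs L).toList =
      (PySem.List.pyRange 0 (xs.length : Int) L).flatMap
        (fun i =>
          (PySem.List.slice xs (some i) (some (i + L))).flatMap (fun x => PySem.Int.toChars x) ++
            (if i + L ≤ (xs.length : Int) then [' '] else [])) := by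
  unfold bit_array_to_string_alt
  simp only []
  have hb : (fun (ps : List String) (i : Int) =>
      let chunk := PySem.Str.join ""
        ((PySem.List.slice xs (some i) (some (i + L))).map PySem.Int.toStr)
      if i + L ≤ (xs.length : Int) then ps ++ [chunk ++ " "] else ps ++ [chunk]) =
      (fun ps i => ps ++
        [if i + L ≤ (xs.length : Int)
         then PySem.Str.join "" ((PySem.List.slice xs (some i) (some (i + L))).map PySem.Int.toStr) ++ " "
         else PySem.Str.join "" ((PySem.List.slice xs (some i) (some (i + L))).map PySem.Int.toStr)]) := by
    funext ps i; split_ifs <;> rfl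
  rw [hb, PySem.List.foldl_append_singleton_eq_map]
  rw [PySem.Str.toList_join]
  simp only [List.nil_append, String.toList_empty, List.map_map]
  rw [pvJoinNil]
  simp only [List.flatMap_def]
  congr 1
  apply List.map_congr_left
  intro i _
  simp only [Function.comp]
  split_ifs
  all_goals
    simp only [String.toList_append, PySem.Str.toList_join, String.toList_empty, pvJoinNil,
      List.map_map, pvSpaceToList, List.append_nil]
  all_goals
    have hcomp : String.toList ∘ PySem.Int.toStr = fun x : Int => PySem.Int.toChars x :=
      funext PySem.Int.toList_toStr
    rw [hcomp, ← List.flatMap_def]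

theorem pvA_eq_chunks (L : Int) (hL : L ≠ 0) (N : Nat) : ∀ (xs : List Int), xs.length ≤ N →
    (PySem.List.pyRange 0 (xs.length : Int) 1).flatMap
        (fun i => PySem.Int.toChars (PySem.List.pyGetD xs i 0) ++
          (if PySem.Int.mod (i + 1) L = 0 then [' '] else [])) =
      pvChunks (L.natAbs - 1) xs := by
  have hs : 0 < L.natAbs := Int.natAbs_pos.mpr hL
  set s := L.natAbs with hsdef
  have hcond : ∀ i : Int, (PySem.Int.mod (i + 1) L = 0) ↔ ((s : Int) ∣ (i + 1)) := by
    intro i; rw [PySem.Int.mod_eq_zero_iff_dvd, ← Int.natAbs_dvd]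
  induction N with
  | zero =>
    intro xs hlen
    have : xs = [] := List.eq_nil_of_length_eq_zero (by omega)
    subst this
    rw [pvChunks]
    simp
  | succ N ih =>
    intro xs hlen
    by_cases hxs : xs = []
    · subst hxs; rw [pvChunks]; simp
    have hn : 0 < xs.length := List.length_pos_iff.mpr hxs
    rw [pvChunks, if_neg (by simp [hxs])]
    have hts : s - 1 + 1 = s := by omega
    by_cases hsn : s ≤ xs.length
    · -- a full chunk followed by the rest
      rw [PySem.List.pyRange_one_append 0 (s : Int) (xs.length : Int) (by omega) (by omega),
        List.flatMap_append]
      -- the chunk [0, s): no space before the last element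
      have hsplit1 : PySem.List.pyRange 0 (s : Int) 1 =
          PySem.List.pyRange 0 ((s - 1 : Nat) : Int) 1 ++ [((s - 1 : Nat) : Int)] := by
        have h0 : (0 : Int) ≤ ((s - 1 : Nat) : Int) := by omega
        have := PySem.List.pyRange_one_succ_right (a := 0) (b := ((s - 1 : Nat) : Int)) h0
        rw [show ((s : Nat) : Int) = ((s - 1 : Nat) : Int) + 1 by omega, this]
      rw [hsplit1, List.flatMap_append]
      have h1 : (PySem.List.pyRange 0 ((s - 1 : Nat) : Int) 1).flatMap
          (fun i => PySem.Int.toChars (PySem.List.pyGetD xs i 0) ++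
            (if PySem.Int.mod (i + 1) L = 0 then [' '] else [])) =
          (xs.take (s - 1)).flatMap (fun x => PySem.Int.toChars x) := by
        rw [List.flatMap_congr (g := fun i => PySem.Int.toChars (PySem.List.pyGetD xs i 0)) ?_]
        · rw [← List.flatMap_map (fun i => PySem.List.pyGetD xs i 0) (fun x => PySem.Int.toChars x),
            pvMapTake xs (s - 1) 0 (by omega)]
        · intro i hi
          rw [PySem.List.mem_pyRange_one] at hi
          have hnd : ¬ ((s : Int) ∣ (i + 1)) := by
            intro hd
            have := Int.le_of_dvd (by omega) hd
            omega
          rw [if_neg (by rw [hcond]; exact hnd)]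
          simp
      rw [h1]
      have hlt : s - 1 < xs.length := by omega
      have h2 : PySem.Int.toChars (PySem.List.pyGetD xs ((s - 1 : Nat) : Int) 0) ++
            (if PySem.Int.mod (((s - 1 : Nat) : Int) + 1) L = 0 then [' '] else []) =
          PySem.Int.toChars (xs[s - 1]'hlt) ++ [' '] := by
        have hdvd : (s : Int) ∣ (((s - 1 : Nat) : Int) + 1) := by
          rw [show ((s - 1 : Nat) : Int) + 1 = (s : Int) by omega]
        rw [if_pos (by rw [hcond]; exact hdvd)]
        rw [PySem.List.pyGetD_eq_getElem xs 0 (by omega) (by omega)]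
        simp
      rw [List.flatMap_singleton, h2]
      -- the tail [s, n): shift and recurse
      have h3 : (PySem.List.pyRange (s : Int) (xs.length : Int) 1).flatMap
          (fun i => PySem.Int.toChars (PySem.List.pyGetD xs i 0) ++
            (if PySem.Int.mod (i + 1) L = 0 then [' '] else [])) =
          pvChunks (s - 1) (xs.drop s) := by
        rw [pvRangeShift s xs.length hsn, List.flatMap_map]
        have hcg : ∀ i ∈ PySem.List.pyRange 0 ((xs.length - s : Nat) : Int) 1,
            (PySem.Int.toChars (PySem.List.pyGetD xs (i + (s : Int)) 0) ++
              (if PySem.Int.mod (i + (s : Int) + 1) L = 0 then [' '] else [])) =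
            (PySem.Int.toChars (PySem.List.pyGetD (xs.drop s) i 0) ++
              (if PySem.Int.mod (i + 1) L = 0 then [' '] else [])) := by
          intro i hi
          rw [PySem.List.mem_pyRange_one] at hi
          congr 1
          · rw [show i + (s : Int) = ((s + i.toNat : Nat) : Int) from by omega,
              PySem.List.pyGetD_eq_getElem xs 0 (by omega) (by omega),
              PySem.List.pyGetD_eq_getElem (xs.drop s) 0 (by omega) (by simp; omega)]
            simp only [List.getElem_drop, Int.toNat_natCast]
          · have hiff : PySem.Int.mod (i + (s : Int) + 1) L = 0 ↔ PySem.Int.mod (i + 1) L = 0 := by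
              rw [hcond, hcond, show i + (s : Int) + 1 = (s : Int) + (i + 1) by ring,
                Int.dvd_add_right (dvd_refl _)]
            exact if_congr hiff rfl rfl
        rw [List.flatMap_congr hcg]
        have := ih (xs.drop s) (by simp; omega)
        simpa using this
      rw [h3, if_pos (by omega), hts]
      have htake : List.take s xs = List.take (s - 1) xs ++ [xs[s - 1]'hlt] := by
        have h := List.take_add_one (l := xs) (i := s - 1)
        rw [hts] at h
        rw [h, List.getElem?_eq_getElem hlt]
        rfl
      rw [htake, List.flatMap_append]
      simp [List.append_assoc]
    · -- last, partial chunk: no space anywhere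
      rw [if_neg (by omega), hts]
      have hcg : ∀ i ∈ PySem.List.pyRange 0 (xs.length : Int) 1,
          (PySem.Int.toChars (PySem.List.pyGetD xs i 0) ++
            (if PySem.Int.mod (i + 1) L = 0 then [' '] else [])) =
          PySem.Int.toChars (PySem.List.pyGetD xs i 0) := by
        intro i hi
        rw [PySem.List.mem_pyRange_one] at hi
        have hnd : ¬ ((s : Int) ∣ (i + 1)) := by
          intro hd
          have := Int.le_of_dvd (by omega) hd
          omega
        rw [if_neg (by rw [hcond]; exact hnd)]
        simp
      rw [List.flatMap_congr hcg,
        ← List.flatMap_map (fun i => PySem.List.pyGetD xs i 0) (fun x => PySem.Int.toChars x),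
        pvMapTake xs xs.length 0 le_rfl]
      simp [List.take_length]
      rw [List.take_of_length_le (show xs.length ≤ s by omega)]

theorem pvChunkConsNil (b s : Int) (hs : 0 < s) (hb : b ≤ 0) : PySem.List.pyRange 0 b s = [] := by
  rw [PySem.List.pyRange_of_pos 0 b hs, if_neg (by omega)]
  simp

theorem pvB_eq_chunks (L : Int) (hL : 0 < L) (N : Nat) : ∀ (xs : List Int), xs.length ≤ N →
    (PySem.List.pyRange 0 (xs.length : Int) L).flatMap
        (fun i =>
          (PySem.List.slice xs (some i) (some (i + L))).flatMap (fun x => PySem.Int.toChars x) ++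
            (if i + L ≤ (xs.length : Int) then [' '] else [])) =
      pvChunks (L.natAbs - 1) xs := by
  have hs : 0 < L.natAbs := Int.natAbs_pos.mpr hL.ne'
  have habs : L = ((L.natAbs : Nat) : Int) := by omega
  set s := L.natAbs with hsdef
  induction N with
  | zero =>
    intro xs hlen
    have : xs = [] := List.eq_nil_of_length_eq_zero (by omega)
    subst this
    rw [pvChunks]
    simp [pvRange00]
  | succ N ih =>
    intro xs hlen
    by_cases hxs : xs = []
    · subst hxs; rw [pvChunks]; simp [pvRange00]
    have hn : 0 < xs.length := List.length_pos_iff.mpr hxs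
    have hts : s - 1 + 1 = s := by omega
    rw [pvChunks, if_neg (by simp [hxs]), hts]
    rw [habs, pvChunkCons (xs.length : Int) ((s : Nat) : Int) (by omega) (by omega),
      List.flatMap_cons, List.flatMap_map]
    have hchunk0 : PySem.List.slice xs (some 0) (some (0 + ((s : Nat) : Int))) = xs.take s := by
      rw [PySem.List.slice_toNat xs (by omega) (by omega)]
      simp
    simp only [] at hchunk0 ⊢
    rw [hchunk0]
    by_cases hsn : s ≤ xs.length
    · rw [if_pos (by omega)]
      have htail : (PySem.List.pyRange 0 ((xs.length : Int) - ((s : Nat) : Int)) ((s : Nat) : Int)).flatMap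
          (fun i =>
            (PySem.List.slice xs (some (i + ((s : Nat) : Int)))
                (some (i + ((s : Nat) : Int) + ((s : Nat) : Int)))).flatMap (fun x => PySem.Int.toChars x) ++
              (if i + ((s : Nat) : Int) + ((s : Nat) : Int) ≤ (xs.length : Int) then [' '] else [])) =
          pvChunks (s - 1) (xs.drop s) := by
        have hcast : ((xs.length : Int) - ((s : Nat) : Int)) = (((xs.length - s : Nat) : Nat) : Int) := by omega
        rw [hcast]
        have hcg : ∀ i ∈ PySem.List.pyRange 0 (((xs.length - s : Nat) : Nat) : Int) ((s : Nat) : Int),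
            ((PySem.List.slice xs (some (i + ((s : Nat) : Int)))
                (some (i + ((s : Nat) : Int) + ((s : Nat) : Int)))).flatMap (fun x => PySem.Int.toChars x) ++
              (if i + ((s : Nat) : Int) + ((s : Nat) : Int) ≤ (xs.length : Int) then [' '] else [])) =
            ((PySem.List.slice (xs.drop s) (some i) (some (i + ((s : Nat) : Int)))).flatMap
                (fun x => PySem.Int.toChars x) ++
              (if i + ((s : Nat) : Int) ≤ ((xs.drop s).length : Int) then [' '] else [])) := by
          intro i hi
          rw [PySem.List.mem_pyRange_iff_of_pos (by omega)] at hi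
          congr 1
          · rw [PySem.List.slice_toNat xs (by omega) (by omega),
              PySem.List.slice_toNat (xs.drop s) (by omega) (by omega)]
            rw [List.drop_drop]
            rw [show (i + ((s : Nat) : Int) + ((s : Nat) : Int)).toNat - (i + ((s : Nat) : Int)).toNat = s from by omega,
              show (i + ((s : Nat) : Int)).toNat - i.toNat = s from by omega,
              show (i + ((s : Nat) : Int)).toNat = s + i.toNat from by omega,
              Nat.add_comm s i.toNat]
          · exact if_congr (by simp; omega) rfl rfl
        rw [List.flatMap_congr hcg]
        have := ih (xs.drop s) (by simp; omega)
        rw [habs] at this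
        simpa using this
      rw [htail, if_pos hsn]
      simp [List.append_assoc]
    · rw [if_neg (by omega)]
      rw [pvChunkConsNil _ _ (by omega) (by omega), List.flatMap_nil,
        if_neg (by omega)]
      simp [List.take_of_length_le (show xs.length ≤ s by omega)]


-- ===== VERDICT (by name: the statement is the Claim_ definition above) =====
theorem bit_array_to_string_spec : Claim_equal_bit_array_to_string := by
  intro array length _ hpre
  unfold Spec_bit_array_to_string
  have h1 := (pvA_toList array length).trans
    (pvA_eq_chunks length (by exact_mod_cast hpre.ne') array.length array le_rfl)
  have h2 := (pvB_toList array length).trans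
    (pvB_eq_chunks length hpre array.length array le_rfl)
  exact String.toList_inj.mp (h1.trans h2.symm)
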